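-- pv_equiv track=rewrite | github.com/vivek-pippalla/amazon-review-sentiment-absa | absa.py | check_negation_context
-- ===== SOURCE A (Python) =====
-- negation_words = {
--     "not", "no", "never", "neither", "nor", "none", "isn't", "aren't", "wasn't",
--     "weren't", "don't", "doesn't", "didn't", "cannot", "can't", "couldn't",
--     "shouldn't", "wouldn't", "won't", "without", "lack", "lacks", "lacking"
-- }
--
-- def check_negation_context(text, target_word, window_size=5):
--     """Check if a target word is negated within a given context window."""
--     words = text.lower().split()
--     if target_word not in words:
--         return False
--
--     target_indices = [i for i, word in enumerate(words) if word == target_word]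
--
--     for idx in target_indices:
--         # Check for negation words within the window
--         start = max(0, idx - window_size)
--         end = min(len(words), idx + 1)  # +1 because we want to include the target word
--         context_before = words[start:end]
--
--         if any(neg in context_before for neg in negation_words):
--             return True
--
--     return False
-- ===== SOURCE B (Python) =====
-- negation_words = {
--     "not", "no", "never", "neither", "nor", "none", "isn't", "aren't", "wasn't",
--     "weren't", "don't", "doesn't", "didn't", "cannot", "can't", "couldn't",
--     "shouldn't", "wouldn't", "won't", "without", "lack", "lacks", "lacking"
-- }
--
-- def check_negation_context(text, target_word, window_size=5):
--     """Check if a target word is negated within a given context window.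
--
--     Single pass: track the index of the most recent negation word; the target
--     is negated iff it appears within window_size words after that index
--     (the target word itself counts, distance 0)."""
--     last_neg = None
--     for i, word in enumerate(text.lower().split()):
--         if word in negation_words:
--             last_neg = i
--         if word == target_word and last_neg is not None and i - last_neg <= window_size:
--             return True
--     return False
-- ===== Notes on version B (the rewrite author's own statement) =====
-- stated objective: alternative
-- what changed: Replaces the two-phase scan (collect all target indices, then slice and search a window per occurrence) with one pass that tracks the index of the most recent negation word and compares distances, removing the per-occurrence window/negation-set scan (worst-case O(n^2) -> O(n)); the speed difference was not measurable on the generated inputs.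
import Mathlib
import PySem

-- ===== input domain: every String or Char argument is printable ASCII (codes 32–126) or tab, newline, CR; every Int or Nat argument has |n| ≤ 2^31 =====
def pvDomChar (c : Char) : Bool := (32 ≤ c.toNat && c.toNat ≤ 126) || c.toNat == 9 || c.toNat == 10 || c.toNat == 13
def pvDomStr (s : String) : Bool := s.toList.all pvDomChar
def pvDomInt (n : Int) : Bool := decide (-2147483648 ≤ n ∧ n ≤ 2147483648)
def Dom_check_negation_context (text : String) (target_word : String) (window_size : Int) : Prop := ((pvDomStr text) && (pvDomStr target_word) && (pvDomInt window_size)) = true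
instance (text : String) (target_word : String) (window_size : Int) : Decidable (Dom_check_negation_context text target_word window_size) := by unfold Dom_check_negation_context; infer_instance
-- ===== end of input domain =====

-- B replaces A's per-occurrence window slice with one pass tracking the most recent negation index (alternative single-pass algorithm).

-- ===== PORT A =====
-- the module-level set 'negation_words'
def pvNegWords : PySem.Set String := PySem.Set.ofList
  ["not", "no", "never", "neither", "nor", "none", "isn't", "aren't", "wasn't",
   "weren't", "don't", "doesn't", "didn't", "cannot", "can't", "couldn't",
   "shouldn't", "wouldn't", "won't", "without", "lack", "lacks", "lacking"]

def check_negation_context (text : String) (target_word : String) (window_size : Int) : Bool :=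
  let words := PySem.Str.split₀ (PySem.Str.lower text)
  if ¬ (words.contains target_word) then false
  else
    let target_indices : List Int :=
      ((PySem.List.enumerate words 0).filter (fun p => p.2 == target_word)).map (·.1)
    -- 'for idx in target_indices: … if any(…): return True' / final 'return False'
    target_indices.any (fun idx =>
      let start := max 0 (idx - window_size)
      let stop := min (words.length : Int) (idx + 1)
      let context_before := PySem.List.slice words (some start) (some stop)
      -- any(neg in context_before for neg in negation_words): bool, set-iteration-order independent
      pvNegWords.any (fun neg => context_before.contains neg))

-- ===== PORT B =====
-- 'last_neg is not None and i - last_neg <= window_size'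
def pvWithin (window_size i : Int) : Option Int → Bool
  | none => false
  | some j => decide (i - j ≤ window_size)

-- single pass: 'last_neg' is the index of the most recent negation word (none before any)
def pvAltGo (target_word : String) (window_size : Int) (i : Int) (last_neg : Option Int) :
    List String → Bool
  | [] => false
  | w :: rest =>
    let last_neg' := if pvNegWords.contains w then some i else last_neg
    if w == target_word && pvWithin window_size i last_neg' then true
    else pvAltGo target_word window_size (i + 1) last_neg' rest

def check_negation_context_alt (text : String) (target_word : String) (window_size : Int) : Bool :=
  pvAltGo target_word window_size 0 none (PySem.Str.split₀ (PySem.Str.lower text))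

-- ===== PRECONDITION & SPEC =====
def Spec_check_negation_context (text : String) (target_word : String) (window_size : Int) (out : Bool) : Prop := out = check_negation_context_alt text target_word window_size
instance (text : String) (target_word : String) (window_size : Int) (out : Bool) : Decidable (Spec_check_negation_context text target_word window_size out) := by unfold Spec_check_negation_context; infer_instance

-- ===== CLAIM (what is proved, stated in full; the proofs are below) =====
def Claim_equal_check_negation_context : Prop := ∀ (text : String) (target_word : String) (window_size : Int), Dom_check_negation_context text target_word window_size → Spec_check_negation_context text target_word window_size (check_negation_context text target_word window_size)

-- ===== LEMMAS AND PROOFS =====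

-- the common characterisation: some occurrence of the target has a negation word at distance ≤ window_size before it
def pvP (t : String) (ws : Int) (words : List String) : Prop :=
  ∃ k : Nat, ∃ _ : k < words.length, words[k] = t ∧
    ∃ j : Nat, ∃ _ : j ≤ k, ((k : Int) - (j : Int) ≤ ws) ∧ words[j]'(by omega) ∈ pvNegWords

lemma pv_mem_drop_take {α : Type} (xs : List α) (a b : Nat) (x : α) :
    x ∈ (xs.drop a).take b ↔ ∃ j : Nat, ∃ _ : j < xs.length, a ≤ j ∧ j < a + b ∧ xs[j] = x := by
  constructor
  · intro hx
    obtain ⟨m, hm, he⟩ := List.mem_iff_getElem.mp hx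
    have hm' : m < b ∧ a + m < xs.length := by
      have := hm; simp [List.length_take, List.length_drop] at this; omega
    refine ⟨a + m, hm'.2, by omega, by omega, ?_⟩
    rw [← he]
    rw [List.getElem_take, List.getElem_drop]
  · rintro ⟨j, hj, haj, hjb, he⟩
    apply List.mem_iff_getElem.mpr
    refine ⟨j - a, ?_, ?_⟩
    · simp [List.length_take, List.length_drop]; omega
    · rw [List.getElem_take, List.getElem_drop]
      rw [← he]; congr 1; omega

lemma pvA_iff (t : String) (ws : Int) (words : List String) :
    (if ¬ (words.contains t) then false
     else
       (((PySem.List.enumerate words 0).filter (fun p => p.2 == t)).map (·.1)).any (fun idx =>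
         pvNegWords.any (fun neg =>
           (PySem.List.slice words (some (max 0 (idx - ws))) (some (min (words.length : Int) (idx + 1)))).contains neg))) = true
      ↔ pvP t ws words := by
  by_cases hc : words.contains t = true
  · rw [if_neg (not_not_intro hc), List.any_eq_true]
    unfold pvP
    constructor
    · rintro ⟨idx, hidx, hf⟩
      simp only [List.mem_map, List.mem_filter, PySem.List.mem_enumerate_iff, beq_iff_eq] at hidx
      obtain ⟨p, ⟨⟨k, hk, rfl⟩, hpt⟩, hpidx⟩ := hidx
      simp only at hpt hpidx
      subst hpidx
      rw [List.any_eq_true] at hf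
      obtain ⟨neg, hneg, hctx⟩ := hf
      rw [List.contains_iff_mem] at hctx
      rw [PySem.List.slice_toNat words (by omega) (by omega)] at hctx
      rw [pv_mem_drop_take] at hctx
      obtain ⟨j, hj, h1, h2, hje⟩ := hctx
      refine ⟨k, hk, hpt, j, by omega, by omega, by rw [hje]; exact hneg⟩
    · rintro ⟨k, hk, hkt, j, hjk, hd, hmem⟩
      refine ⟨(0 : Int) + (k : Nat), ?_, ?_⟩
      · simp only [List.mem_map, List.mem_filter, PySem.List.mem_enumerate_iff, beq_iff_eq]
        exact ⟨((0 : Int) + (k : Nat), words[k]), ⟨⟨k, hk, rfl⟩, hkt⟩, rfl⟩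
      · rw [List.any_eq_true]
        refine ⟨words[j]'(by omega), hmem, ?_⟩
        rw [List.contains_iff_mem]
        rw [PySem.List.slice_toNat words (by omega) (by omega)]
        rw [pv_mem_drop_take]
        exact ⟨j, by omega, by omega, by omega, rfl⟩
  · rw [if_pos hc]
    constructor
    · intro h; simp at h
    · intro hP
      exfalso
      obtain ⟨k, hk, hkt, _⟩ := hP
      exact hc (List.contains_iff_mem.mpr (hkt ▸ List.getElem_mem hk))

lemma pvGo_iff (t : String) (ws : Int) :
    ∀ (xs : List String) (i : Int) (ln : Option Int),
      (∀ j, ln = some j → j < i) →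
      (pvAltGo t ws i ln xs = true ↔
        ∃ k : Nat, ∃ _ : k < xs.length, xs[k] = t ∧
          ((∃ m : Nat, ∃ _ : m ≤ k, ((k : Int) - (m : Int) ≤ ws) ∧ xs[m]'(by omega) ∈ pvNegWords)
           ∨ (∃ j, ln = some j ∧ (i + (k : Int)) - j ≤ ws))) := by
  intro xs
  induction xs with
  | nil => intro i ln _; simp [pvAltGo]
  | cons w rest ih =>
    intro i ln hinv
    have hstep : pvAltGo t ws i ln (w :: rest) =
        (if w == t && pvWithin ws i (if pvNegWords.contains w then some i else ln) then true
         else pvAltGo t ws (i + 1) (if pvNegWords.contains w then some i else ln) rest) := rfl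
    set ln' := if pvNegWords.contains w then some i else ln with hln'
    clear_value ln'
    rw [hstep]
    have hinv' : ∀ j, ln' = some j → j < i + 1 := by
      intro j hj
      rw [hln'] at hj
      split at hj
      · cases hj; omega
      · exact lt_trans (hinv j hj) (by omega)
    have hcontains : pvNegWords.contains w = true ↔ w ∈ pvNegWords := List.contains_iff_mem
    by_cases hhead : (w == t && pvWithin ws i ln') = true
    · -- head condition fires: LHS is true, build the witness k = 0
      rw [if_pos hhead]
      simp only [true_iff, Bool.and_eq_true, beq_iff_eq] at hhead ⊢
      obtain ⟨hwt, hm⟩ := hhead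
      refine ⟨0, by simp, by simpa using hwt, ?_⟩
      rcases hj' : ln' with _ | j
      · rw [hj'] at hm; simp [pvWithin] at hm
      · rw [hj'] at hm
        simp only [pvWithin, decide_eq_true_eq] at hm
        by_cases hw : pvNegWords.contains w = true
        · rw [hln', if_pos hw] at hj'
          have hji : j = i := by injection hj' with h; exact h.symm
          subst hji
          exact Or.inl ⟨0, le_refl 0, by omega, by simpa using hcontains.mp hw⟩
        · rw [hln', if_neg hw] at hj'
          exact Or.inr ⟨j, hj', by omega⟩
    · rw [if_neg hhead]
      rw [ih (i + 1) ln' hinv']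
      constructor
      · -- a witness in rest gives one in w :: rest (shifted by one)
        rintro ⟨k, hk, ht, hrest⟩
        refine ⟨k + 1, by simpa using Nat.succ_lt_succ hk, by simpa using ht, ?_⟩
        rcases hrest with ⟨m, hm, hd, hmem⟩ | ⟨j, hj, hd⟩
        · exact Or.inl ⟨m + 1, by omega, by omega, by simpa using hmem⟩
        · rw [hln'] at hj
          by_cases hw : pvNegWords.contains w = true
          · rw [if_pos hw] at hj
            cases hj
            exact Or.inl ⟨0, by omega, by omega,
              by simpa using hcontains.mp hw⟩
          · rw [if_neg hw] at hj
            exact Or.inr ⟨j, hj, by omega⟩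
      · -- a witness in w :: rest: k = 0 would contradict hhead, else shift down
        rintro ⟨k, hk, ht, hrest⟩
        match k, hk, ht, hrest with
        | 0, hk, ht, hrest =>
          exfalso
          apply hhead
          simp only [Bool.and_eq_true, beq_iff_eq]
          refine ⟨by simpa using ht, ?_⟩
          rcases hrest with ⟨m, hm, hd, hmem⟩ | ⟨j, hj, hd⟩
          · interval_cases m
            have hw : pvNegWords.contains w = true := hcontains.mpr (by simpa using hmem)
            rw [hln', if_pos hw]
            simp only [pvWithin, decide_eq_true_eq]
            omega
          · have hji : j < i := hinv j hj
            by_cases hw : pvNegWords.contains w = true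
            · rw [hln', if_pos hw]
              simp only [pvWithin, decide_eq_true_eq]
              omega
            · rw [hln', if_neg hw, hj]
              simp only [pvWithin, decide_eq_true_eq]
              omega
        | k' + 1, hk, ht, hrest =>
          refine ⟨k', by simp only [List.length_cons] at hk; omega, by simpa using ht, ?_⟩
          rcases hrest with ⟨m, hm, hd, hmem⟩ | ⟨j, hj, hd⟩
          · match m, hm, hmem with
            | 0, hm, hmem =>
              have hw : pvNegWords.contains w = true := hcontains.mpr (by simpa using hmem)
              exact Or.inr ⟨i, by rw [hln', if_pos hw], by omega⟩
            | m' + 1, hm, hmem =>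
              exact Or.inl ⟨m', by omega, by omega, by simpa using hmem⟩
          · by_cases hw : pvNegWords.contains w = true
            · have hji : j < i := hinv j hj
              exact Or.inr ⟨i, by rw [hln', if_pos hw], by omega⟩
            · exact Or.inr ⟨j, by rw [hln', if_neg hw]; exact hj, by omega⟩

lemma pvB_iff (t : String) (ws : Int) (words : List String) :
    pvAltGo t ws 0 none words = true ↔ pvP t ws words := by
  rw [pvGo_iff t ws words 0 none (by intro j h; cases h)]
  unfold pvP
  constructor
  · rintro ⟨k, hk, ht, hrest⟩
    refine ⟨k, hk, ht, ?_⟩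
    rcases hrest with ⟨m, hm, hd, hmem⟩ | ⟨j, hj, _⟩
    · exact ⟨m, hm, hd, hmem⟩
    · cases hj
  · rintro ⟨k, hk, ht, j, hm, hd, hmem⟩
    exact ⟨k, hk, ht, Or.inl ⟨j, hm, hd, hmem⟩⟩

lemma pv_main (t : String) (ws : Int) (words : List String) :
    (if ¬ (words.contains t) then false
     else
       (((PySem.List.enumerate words 0).filter (fun p => p.2 == t)).map (·.1)).any (fun idx =>
         pvNegWords.any (fun neg =>
           (PySem.List.slice words (some (max 0 (idx - ws))) (some (min (words.length : Int) (idx + 1)))).contains neg)))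
    = pvAltGo t ws 0 none words := by
  rw [Bool.eq_iff_iff]
  exact (pvA_iff t ws words).trans (pvB_iff t ws words).symm

-- ===== VERDICT (by name: the statement is the Claim_ definition above) =====
theorem check_negation_context_spec : Claim_equal_check_negation_context := by
  intro text target_word window_size _
  unfold Spec_check_negation_context check_negation_context check_negation_context_alt
  exact pv_main target_word window_size (PySem.Str.split₀ (PySem.Str.lower text))
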